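-- pv_equiv track=rewrite | github.com/CorneliaKelinske/MPBC-exercises | find_greater_numbers.py | find_greater_numbers_BC
-- ===== SOURCE A (Python) =====
-- def find_greater_numbers_BC(arr):
--     count = 0
--     i = 0
--     j = 1
--     while i < len(arr):
--         while j < len(arr):
--             if arr[j] > arr[i]:
--                 count += 1
--             j+=1
--         j = i+1
--         i+=1
--     return count;
-- ===== SOURCE B (Python) =====
-- def find_greater_numbers_BC(arr):
--     # Scan from the right, keeping a sorted list of the elements already seen
--     # (the suffix); for each element, binary-search the upper bound of equal-or-
--     # smaller values: everything past it in the sorted suffix is a greater-later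
--     # element. O(n log n) comparisons (insert is O(n) moves but cache-cheap).
--     seen = []
--     count = 0
--     for x in reversed(arr):
--         lo, hi = 0, len(seen)
--         while lo < hi:
--             mid = (lo + hi) // 2
--             if seen[mid] <= x:
--                 lo = mid + 1
--             else:
--                 hi = mid
--         count += len(seen) - lo
--         seen.insert(lo, x)
--     return count
-- ===== Notes on version B (the rewrite author's own statement) =====
-- stated objective: faster
-- what changed: Replaced A's quadratic nested while-loops with a single right-to-left pass that maintains a sorted list of the already-seen suffix and binary-searches (upper bound) how many seen elements are greater than the current one.
import Mathlib
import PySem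

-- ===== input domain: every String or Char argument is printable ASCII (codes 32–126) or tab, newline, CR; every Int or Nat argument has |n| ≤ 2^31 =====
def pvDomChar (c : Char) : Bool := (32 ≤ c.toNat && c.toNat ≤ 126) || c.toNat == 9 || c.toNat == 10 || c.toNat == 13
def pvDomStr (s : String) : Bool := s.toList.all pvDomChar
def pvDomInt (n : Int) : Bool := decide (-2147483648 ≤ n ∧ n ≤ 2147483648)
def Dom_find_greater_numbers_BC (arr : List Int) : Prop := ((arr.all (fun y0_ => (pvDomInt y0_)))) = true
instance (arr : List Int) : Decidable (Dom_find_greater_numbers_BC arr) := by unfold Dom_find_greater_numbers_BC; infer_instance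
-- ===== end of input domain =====

-- B replaces A's quadratic double while-loop by a single right-to-left pass that keeps
-- the already-seen suffix in a sorted list and binary-searches how many of those are
-- greater; objective: faster (fewer comparisons), same exact value on every input.

-- ===== PORT A =====
-- inner while loop of A, ported as structural recursion on a fuel bound that never runs out
-- (fuel starts at len(arr) - j and the guard is j < len(arr)); arr.getD j 0 is exact here:
-- every access is guarded by j < len(arr)
def pvInnerA (arr : List Int) (i : Nat) : Nat → Nat → Int → Int
  | 0, _, count => count
  | fuel + 1, j, count =>
      if j < arr.length then
        pvInnerA arr i fuel (j + 1) (if arr.getD i 0 < arr.getD j 0 then count + 1 else count)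
      else count

-- outer while loop of A: after each round Python sets j = i+1 and then i += 1,
-- so the recursive call receives j equal to the new i
def pvOuterA (arr : List Int) : Nat → Nat → Nat → Int → Int
  | 0, _, _, count => count
  | fuel + 1, i, j, count =>
      if i < arr.length then
        pvOuterA arr fuel (i + 1) (i + 1) (pvInnerA arr i (arr.length - j) j count)
      else count

def find_greater_numbers_BC (arr : List Int) : Int := pvOuterA arr arr.length 0 1 0

-- ===== PORT B =====
-- the inner `while lo < hi` binary search of Source B, fueled (hi - lo shrinks every step,
-- so fuel len(seen) never runs out); seen.getD mid 0 is exact: lo ≤ mid < hi ≤ len(seen)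
def pvUB (seen : List Int) (x : Int) : Nat → Nat → Nat → Nat
  | 0, lo, _ => lo
  | fuel + 1, lo, hi =>
      if lo < hi then
        let mid := (lo + hi) / 2
        if seen.getD mid 0 ≤ x then pvUB seen x fuel (mid + 1) hi else pvUB seen x fuel lo mid
      else lo

-- one iteration of Source B's `for x in reversed(arr)` loop body
def pvStepB (st : List Int × Int) (x : Int) : List Int × Int :=
  let seen := st.1
  let lo := pvUB seen x seen.length 0 seen.length
  (PySem.List.insert seen (lo : Int) x, st.2 + ((seen.length : Int) - (lo : Int)))

def find_greater_numbers_BC_alt (arr : List Int) : Int :=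
  (arr.reverse.foldl pvStepB ([], 0)).2

-- ===== PRECONDITION & SPEC =====
def Spec_find_greater_numbers_BC (arr : List Int) (out : Int) : Prop := out = find_greater_numbers_BC_alt arr
instance (arr : List Int) (out : Int) : Decidable (Spec_find_greater_numbers_BC arr out) := by unfold Spec_find_greater_numbers_BC; infer_instance

-- ===== CLAIM (what is proved, stated in full; the proofs are below) =====
def Claim_equal_find_greater_numbers_BC : Prop := ∀ (arr : List Int), Dom_find_greater_numbers_BC arr → Spec_find_greater_numbers_BC arr (find_greater_numbers_BC arr)

-- ===== LEMMAS AND PROOFS =====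

-- number of elements of l strictly greater than x / strictly less than x / ≤ x
def cntGT (x : Int) (l : List Int) : Nat := l.countP (fun v => decide (x < v))
def cntLT (x : Int) (l : List Int) : Nat := l.countP (fun v => decide (v < x))
def cntLE (x : Int) (l : List Int) : Nat := l.countP (fun v => decide (v ≤ x))

-- the common specification: for each element, count the strictly greater later elements
def S : List Int → Nat
  | [] => 0
  | x :: xs => cntGT x xs + S xs

-- number of "greater-earlier" pairs (used for the reversed traversal of B)
def I : List Int → Nat
  | [] => 0
  | x :: rest => cntLT x rest + I rest

-- Σ_{y ∈ l} cntGT y m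
def C : List Int → List Int → Nat
  | [], _ => 0
  | y :: t, m => cntGT y m + C t m

theorem innerA_eq (arr : List Int) (i : Nat) :
    ∀ n j c, arr.length - j ≤ n → pvInnerA arr i n j c = c + (cntGT (arr.getD i 0) (arr.drop j) : Int) := by
  intro n
  induction n with
  | zero =>
    intro j c h
    have hnil : arr.drop j = [] := List.drop_eq_nil_of_le (by omega)
    simp [pvInnerA, hnil, cntGT]
  | succ n ih =>
    intro j c h
    rw [pvInnerA]
    by_cases hj : j < arr.length
    · simp only [hj, if_true]
      rw [ih (j + 1) _ (by omega)]
      have hd : arr.drop j = arr[j] :: arr.drop (j + 1) := List.drop_eq_getElem_cons hj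
      rw [hd]
      simp only [cntGT, List.countP_cons, List.getD_eq_getElem _ _ hj, decide_eq_true_eq]
      split_ifs <;> push_cast <;> omega
    · have hnil : arr.drop j = [] := List.drop_eq_nil_of_le (by omega)
      simp [hj, hnil, cntGT]

theorem outerA_eq (arr : List Int) :
    ∀ n i c, arr.length - i ≤ n → pvOuterA arr n i i c = c + (S (arr.drop i) : Int) := by
  intro n
  induction n with
  | zero =>
    intro i c h
    have hnil : arr.drop i = [] := List.drop_eq_nil_of_le (by omega)
    simp [pvOuterA, hnil, S]
  | succ n ih =>
    intro i c h
    rw [pvOuterA]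
    by_cases hi : i < arr.length
    · simp only [hi, if_true]
      rw [ih (i + 1) _ (by omega), innerA_eq arr i (arr.length - i) i c (by omega)]
      have hd : arr.drop i = arr[i] :: arr.drop (i + 1) := List.drop_eq_getElem_cons hi
      rw [hd]
      -- the self-comparison arr[i] < arr[i] never counts
      simp only [S, cntGT, List.countP_cons, List.getD_eq_getElem _ _ hi, decide_eq_true_eq]
      rw [if_neg (lt_irrefl _)]
      push_cast
      ring
    · have hnil : arr.drop i = [] := List.drop_eq_nil_of_le (by omega)
      simp [hi, hnil, S]

theorem A_eq_S (arr : List Int) : find_greater_numbers_BC arr = (S arr : Int) := by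
  unfold find_greater_numbers_BC
  cases arr with
  | nil => simp [pvOuterA, S]
  | cons a t =>
    show pvOuterA (a :: t) (t.length + 1) 0 1 0 = _
    rw [pvOuterA]
    have h0 : 0 < (a :: t).length := by simp
    simp only [h0, if_true]
    rw [outerA_eq (a :: t) t.length 1 _ (by simp),
        innerA_eq (a :: t) 0 ((a :: t).length - 1) 1 0 (by simp)]
    simp [S, cntGT]

-- characterization of the binary search on a sorted list
theorem pvUB_spec (seen : List Int) (x : Int)
    (hs : List.Pairwise (· ≤ ·) seen) :
    ∀ n lo hi, hi - lo ≤ n → lo ≤ hi → hi ≤ seen.length →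
    (∀ k (h : k < seen.length), k < lo → seen[k] ≤ x) →
    (∀ k (h : k < seen.length), hi ≤ k → x < seen[k]) →
    pvUB seen x n lo hi ≤ seen.length ∧
    (∀ k (h : k < seen.length), k < pvUB seen x n lo hi → seen[k] ≤ x) ∧
    (∀ k (h : k < seen.length), pvUB seen x n lo hi ≤ k → x < seen[k]) := by
  have hmono := List.pairwise_iff_getElem.mp hs
  intro n
  induction n with
  | zero =>
    intro lo hi hle hlohi hhi h1 h2
    simp only [pvUB]
    exact ⟨by omega, h1, fun k h hk => h2 k h (by omega)⟩
  | succ n ih =>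
    intro lo hi hle hlohi hhi h1 h2
    rw [pvUB]
    by_cases hlt : lo < hi
    · simp only [hlt, if_true]
      have hmid : (lo + hi) / 2 < seen.length := by omega
      rw [List.getD_eq_getElem _ _ hmid]
      by_cases hc : seen[(lo + hi) / 2] ≤ x
      · simp only [hc, if_true]
        refine ih ((lo + hi) / 2 + 1) hi (by omega) (by omega) hhi ?_ h2
        intro k h hk
        rcases Nat.lt_or_ge k ((lo + hi) / 2) with hk' | hk'
        · exact le_trans (hmono k ((lo + hi) / 2) h hmid hk') hc
        · have : k = (lo + hi) / 2 := by omega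
          subst this; exact hc
      · simp only [hc, if_false]
        refine ih lo ((lo + hi) / 2) (by omega) (by omega) (by omega) h1 ?_
        intro k h hk
        rcases Nat.lt_or_ge ((lo + hi) / 2) k with hk' | hk'
        · exact lt_of_lt_of_le (by omega) (hmono ((lo + hi) / 2) k hmid h hk')
        · have : k = (lo + hi) / 2 := by omega
          subst this; omega
    · simp only [hlt, if_false]
      exact ⟨by omega, h1, fun k h hk => h2 k h (by omega)⟩

-- countP of a predicate that holds exactly on the first r indices
theorem countP_index (p : Int → Bool) :
    ∀ (l : List Int) (r : Nat), r ≤ l.length →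
    (∀ k (h : k < l.length), p l[k] = true ↔ k < r) → l.countP p = r := by
  intro l
  induction l with
  | nil => intro r hr _; simp at hr ⊢; omega
  | cons a t ih =>
    intro r hr h
    rcases r with _ | r'
    · have ha : ¬ p a = true := by
        intro hc; exact absurd ((h 0 (by simp)).mp hc) (by omega)
      rw [List.countP_cons]
      rw [ih 0 (by omega) ?_]
      · simp [ha]
      · intro k hk
        constructor
        · intro hc
          exact absurd ((h (k + 1) (by simpa using Nat.succ_lt_succ hk)).mp (by simpa using hc)) (by omega)
        · omega
    · have ha : p a = true := (h 0 (by simp)).mpr (by omega)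
      rw [List.countP_cons, ih r' (by simpa using hr) ?_]
      · simp [ha]
      · intro k hk
        have := h (k + 1) (by simpa using Nat.succ_lt_succ hk)
        simpa [Nat.succ_lt_succ_iff] using this

theorem cntLE_add_cntGT (x : Int) (l : List Int) : cntLE x l + cntGT x l = l.length := by
  induction l with
  | nil => simp [cntLE, cntGT]
  | cons a t ih =>
    simp only [cntLE, cntGT, List.countP_cons, List.length_cons] at *
    by_cases h : a ≤ x
    · have : ¬ x < a := by omega
      simp [h, this]; omega
    · have : x < a := by omega
      simp [h, this]; omega

theorem C_cons_acc (x : Int) : ∀ (t m : List Int), C t (x :: m) = cntLT x t + C t m := by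
  intro t
  induction t with
  | nil => simp [C, cntLT]
  | cons y r ih =>
    intro m
    simp only [C, cntLT, List.countP_cons, cntGT] at *
    rw [ih m]
    by_cases h : y < x
    · have : x < y ↔ False := by constructor <;> intro hc <;> [omega; exact hc.elim]
      simp [h]
      omega
    · simp [h]
      omega

theorem C_nil_acc : ∀ (t : List Int), C t [] = 0 := by
  intro t; induction t with
  | nil => rfl
  | cons y r ih => simp [C, cntGT, ih]

theorem foldl_spec : ∀ (l : List Int) (seen m : List Int) (c : Int),
    List.Pairwise (· ≤ ·) seen → seen.Perm m →
    (l.foldl pvStepB (seen, c)).2 = c + (I l : Int) + (C l m : Int) := by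
  intro l
  induction l with
  | nil => intro seen m c _ _; simp [I, C]
  | cons x rest ih =>
    intro seen m c hs hp
    have hub := pvUB_spec seen x hs seen.length 0 seen.length (by omega) (by omega) (le_refl _)
      (by omega) (by intro k h hk; omega)
    set r := pvUB seen x seen.length 0 seen.length with hr
    obtain ⟨hrle, hbelow, habove⟩ := hub
    -- cntLE x seen = r
    have hcle : cntLE x seen = r := by
      refine countP_index _ seen r hrle ?_
      intro k h
      constructor
      · intro hc
        by_contra hk
        have := habove k h (by omega)
        simp at hc
        omega
      · intro hk
        simpa using hbelow k h hk
    have hcgt : (cntGT x seen : Int) = (seen.length : Int) - (r : Int) := by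
      have := cntLE_add_cntGT x seen
      omega
    -- the inserted list
    have hins : PySem.List.insert seen (r : Int) x = seen.take r ++ x :: seen.drop r :=
      PySem.List.insert_natCast seen r x hrle
    have htd : seen.take r ++ seen.drop r = seen := List.take_append_drop r seen
    -- permutation
    have hperm : (seen.take r ++ x :: seen.drop r).Perm (x :: m) := by
      have h1 : (seen.take r ++ x :: seen.drop r).Perm (x :: (seen.take r ++ seen.drop r)) :=
        List.perm_middle
      rw [htd] at h1
      exact h1.trans (hp.cons x)
    -- sortedness of the inserted list
    have hta : ∀ a ∈ seen.take r, a ≤ x := by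
      intro a ha
      obtain ⟨k, hk, hv⟩ := List.mem_iff_getElem.mp ha
      have hk0 : k < (seen.take r).length := hk
      rw [List.length_take] at hk0
      have hk' : k < r := by omega
      have hklen : k < seen.length := by omega
      have : (seen.take r)[k] = seen[k] := List.getElem_take
      rw [this] at hv
      rw [← hv]; exact hbelow k hklen hk'
    have hda : ∀ b ∈ seen.drop r, x < b := by
      intro b hb
      obtain ⟨k, hk, hv⟩ := List.mem_iff_getElem.mp hb
      have hk0 : k < (seen.drop r).length := hk
      rw [List.length_drop] at hk0
      have hklen : r + k < seen.length := by omega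
      have : (seen.drop r)[k] = seen[r + k] := List.getElem_drop
      rw [this] at hv
      rw [← hv]; exact habove (r + k) hklen (by omega)
    have hsorted' : List.Pairwise (· ≤ ·) (seen.take r ++ x :: seen.drop r) := by
      rw [List.pairwise_append]
      refine ⟨List.Pairwise.sublist (List.take_sublist r seen) hs, ?_, ?_⟩
      · rw [List.pairwise_cons]
        exact ⟨fun b hb => le_of_lt (hda b hb),
          List.Pairwise.sublist (List.drop_sublist r seen) hs⟩
      · intro a ha b hb
        rcases List.mem_cons.mp hb with hbx | hbd
        · rw [hbx]; exact hta a ha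
        · exact le_trans (hta a ha) (le_of_lt (hda b hbd))
    -- the added count equals the number of greater elements of m
    have hcnt : (seen.length : Int) - (r : Int) = (cntGT x m : Int) := by
      rw [← hcgt]
      unfold cntGT
      rw [hp.countP_eq]
    -- unfold one step of the fold and apply the induction hypothesis
    have hstep : pvStepB (seen, c) x =
        (seen.take r ++ x :: seen.drop r, c + ((seen.length : Int) - (r : Int))) := by
      simp only [pvStepB, ← hr, hins]
    rw [List.foldl_cons, hstep, ih _ (x :: m) _ hsorted' hperm, C_cons_acc, hcnt]
    simp only [I, C]
    push_cast
    ring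

theorem I_append (t : List Int) (x : Int) : I (t ++ [x]) = I t + cntGT x t := by
  induction t with
  | nil => simp [I, cntLT, cntGT]
  | cons a t ih =>
    simp only [List.cons_append, I, cntLT, List.countP_append, ih, cntGT,
      List.countP_cons, List.countP_nil]
    by_cases h : a < x
    · have h2 : ¬ x < a := by omega
      simp [h2]; omega
    · by_cases h3 : x < a <;> simp [h3] <;> omega

theorem I_reverse (l : List Int) : I l.reverse = S l := by
  induction l with
  | nil => rfl
  | cons x xs ih =>
    rw [List.reverse_cons, I_append, ih]
    simp only [S, cntGT, List.countP_reverse]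
    omega

theorem B_eq_S (arr : List Int) : find_greater_numbers_BC_alt arr = (S arr : Int) := by
  unfold find_greater_numbers_BC_alt
  rw [foldl_spec arr.reverse [] [] 0 (by simp) (List.Perm.refl _), C_nil_acc, I_reverse]
  simp

-- ===== VERDICT (by name: the statement is the Claim_ definition above) =====
theorem find_greater_numbers_BC_spec : Claim_equal_find_greater_numbers_BC := by
  intro arr _
  unfold Spec_find_greater_numbers_BC
  rw [A_eq_S, B_eq_S]
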